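-- pv_equiv track=rewrite | github.com/talhasee/Network-Security | Advanced Encryption Standards/mix_columns_matrix.py | aesPolynomialMultiply
-- ===== SOURCE A (Python) =====
-- def aesPolynomialMultiply(a, b):
--     a = int(a, 16)
--     b = int(b, 16)
--     result = 0
--     while b > 0:
--         if b & 1 == 1:
--             result = result ^ a
--         a <<= 1
--         if a & 0x100 == 0x100:
--             a ^= 0x11B
--         b >>= 1
--     return hex(result)[2:].zfill(2)
-- ===== SOURCE B (Python) =====
-- def aesPolynomialMultiply(a, b):
--     x = int(a, 16)
--     y = int(b, 16)
--     # Pass 1: carry-less (XOR) polynomial product, no reduction.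
--     prod = 0
--     shift = 0
--     while y > 0:
--         if y & 1 == 1:
--             prod ^= x << shift
--         shift += 1
--         y >>= 1
--     # Pass 2: reduce the wide product modulo the AES polynomial 0x11B.
--     for k in range(15, 7, -1):
--         if (prod >> k) & 1 == 1:
--             prod ^= 0x11B << (k - 8)
--     return hex(prod)[2:].zfill(2)
-- ===== Notes on version B (the rewrite author's own statement) =====
-- stated objective: alternative
-- what changed: B first computes the carry-less XOR product of the two byte polynomials in one loop over b's bits (no reduction inside), then reduces the wide accumulator modulo the AES polynomial 0x11B in a separate descending pass over bits 15..8, instead of A's loop that interleaves a reduction into every shift of a.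
-- outside the precondition, e.g. on aesPolynomialMultiply('100', '2'): A returns '200', B returns '36'; on aesPolynomialMultiply('-1', '1'): A returns 'x1', B returns 'xffcb'
import Mathlib
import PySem

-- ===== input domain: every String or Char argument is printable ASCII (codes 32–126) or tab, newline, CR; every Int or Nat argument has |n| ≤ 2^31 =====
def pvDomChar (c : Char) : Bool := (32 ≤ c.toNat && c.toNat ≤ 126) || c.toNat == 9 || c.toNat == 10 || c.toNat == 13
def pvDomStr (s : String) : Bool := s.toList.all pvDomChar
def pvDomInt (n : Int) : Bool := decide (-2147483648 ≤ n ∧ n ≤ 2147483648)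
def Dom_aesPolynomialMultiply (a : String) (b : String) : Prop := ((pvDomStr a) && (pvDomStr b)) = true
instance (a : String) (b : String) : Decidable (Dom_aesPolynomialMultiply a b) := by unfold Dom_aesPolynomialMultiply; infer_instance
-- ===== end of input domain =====

-- B separates the carry-less polynomial product from a single final reduction pass modulo 0x11B,
-- instead of A's interleaved reduce-at-every-shift loop; objective: alternative decomposition, same cost.

-- ===== PORT A =====
-- shared helpers: both Pythons run `int(·, 16)` and `hex(·)[2:].zfill(2)` verbatim
def pvHexDigitChar (d : Nat) : Char := if d < 10 then Char.ofNat (48 + d) else Char.ofNat (87 + d)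

def pvHexRev (n : Nat) : List Char :=
  if h : n = 0 then [] else pvHexDigitChar (n % 16) :: pvHexRev (n / 16)
decreasing_by exact Nat.div_lt_self (Nat.pos_of_ne_zero h) (by omega)

-- hex(n)[2:] : for n ≥ 0 the lowercase hex digits; for n < 0 Python gives '-0x…'[2:] = 'x…'
def pvHexSlice2 (n : Int) : List Char :=
  if n < 0 then 'x' :: (pvHexRev (-n).toNat).reverse
  else if n = 0 then ['0'] else (pvHexRev n.toNat).reverse

def pvHexZ2 (n : Int) : String := PySem.Str.zfill (String.ofList (pvHexSlice2 n)) 2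

-- A's while-loop; fuel b.toNat bounds the number of iterations (b halves while positive)
def pvLoopA (fuel : Nat) (a result b : Int) : Int :=
  match fuel with
  | 0 => result
  | fuel + 1 =>
    if b > 0 then
      let result' := if PySem.Int.band b 1 == 1 then PySem.Int.bxor result a else result
      let a1 := a <<< (1 : Nat)
      let a2 := if PySem.Int.band a1 0x100 == 0x100 then PySem.Int.bxor a1 0x11B else a1
      pvLoopA fuel a2 result' (b >>> (1 : Nat))
    else result

def aesPolynomialMultiply (a : String) (b : String) : String :=
  match PySem.Int.ofStrBase? a 16, PySem.Int.ofStrBase? b 16 with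
  | some x, some y => pvHexZ2 (pvLoopA y.toNat x 0 y)
  | _, _ => ""   -- int(·, 16) raises ValueError: outside Pre_

-- ===== PORT B =====
-- B's own copies of the identical `int(·, 16)` / `hex(·)[2:].zfill(2)` plumbing of Source B
def pvHexDigitCharB (d : Nat) : Char := if d < 10 then Char.ofNat (48 + d) else Char.ofNat (87 + d)

def pvHexRevB (n : Nat) : List Char :=
  if h : n = 0 then [] else pvHexDigitCharB (n % 16) :: pvHexRevB (n / 16)
decreasing_by exact Nat.div_lt_self (Nat.pos_of_ne_zero h) (by omega)

def pvHexSlice2B (n : Int) : List Char :=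
  if n < 0 then 'x' :: (pvHexRevB (-n).toNat).reverse
  else if n = 0 then ['0'] else (pvHexRevB n.toNat).reverse

def pvHexZ2B (n : Int) : String := PySem.Str.zfill (String.ofList (pvHexSlice2B n)) 2

-- pass 1 of Source B: carry-less product, no reduction; fuel y.toNat bounds the iterations
def pvClmul (fuel : Nat) (x prod : Int) (shift : Nat) (y : Int) : Int :=
  match fuel with
  | 0 => prod
  | fuel + 1 =>
    if y > 0 then
      let prod' := if PySem.Int.band y 1 == 1 then PySem.Int.bxor prod (x <<< shift) else prod
      pvClmul fuel x prod' (shift + 1) (y >>> (1 : Nat))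
    else prod

-- pass 2 of Source B: for k in range(15, 7, -1): clear bit k by xor-ing 0x11B << (k - 8)
-- loop body of pass 2: one `for k` iteration
def pvStep (q k : Int) : Int :=
  if PySem.Int.band (q >>> k.toNat) 1 == 1 then PySem.Int.bxor q ((0x11B : Int) <<< (k.toNat - 8))
  else q

def pvRedc (p : Int) : Int := (PySem.List.pyRange 15 7 (-1)).foldl pvStep p

def aesPolynomialMultiply_alt (a : String) (b : String) : String :=
  match PySem.Int.ofStrBase? a 16 with
  | none => ""   -- int(a, 16) raises ValueError: outside Pre_
  | some x =>
    match PySem.Int.ofStrBase? b 16 with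
    | none => ""
    | some y => pvHexZ2B (pvRedc (pvClmul y.toNat x 0 0 y))

-- ===== PRECONDITION & SPEC =====
-- Pre_ excludes inputs on which int(·,16) raises ValueError, and hex strings whose value is
-- negative or above 0xff: outside a byte, A's shift-once-reduce-once loop (and Python's negative
-- hex formatting) returns an accidental unreduced/non-byte string, a corner no one would specify.
def Pre_aesPolynomialMultiply (a : String) (b : String) : Prop :=
  0 ≤ (PySem.Int.ofStrBase? a 16).getD (-1) ∧ (PySem.Int.ofStrBase? a 16).getD (-1) ≤ 255 ∧
  0 ≤ (PySem.Int.ofStrBase? b 16).getD (-1) ∧ (PySem.Int.ofStrBase? b 16).getD (-1) ≤ 255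

instance (a : String) (b : String) : Decidable (Pre_aesPolynomialMultiply a b) := by
  unfold Pre_aesPolynomialMultiply; infer_instance

def pvWitness_aesPolynomialMultiply : String × String := ("57", "83")

def Spec_aesPolynomialMultiply (a : String) (b : String) (out : String) : Prop :=
  out = aesPolynomialMultiply_alt a b
instance (a : String) (b : String) (out : String) : Decidable (Spec_aesPolynomialMultiply a b out) := by
  unfold Spec_aesPolynomialMultiply; infer_instance

-- ===== CLAIM (what is proved, stated in full; the proofs are below) =====
def Claim_equal_aesPolynomialMultiply : Prop := ∀ (a : String) (b : String), Dom_aesPolynomialMultiply a b → Pre_aesPolynomialMultiply a b → Spec_aesPolynomialMultiply a b (aesPolynomialMultiply a b)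

-- ===== LEMMAS AND PROOFS =====

-- the two copies of the hex formatter agree
theorem pvHexRevB_eq (n : Nat) : pvHexRevB n = pvHexRev n := by
  induction n using Nat.strong_induction_on with
  | _ n ih =>
    rw [pvHexRevB, pvHexRev]
    by_cases h : n = 0
    · simp [h]
    · simp only [h, dite_false]
      rw [ih (n / 16) (Nat.div_lt_self (Nat.pos_of_ne_zero h) (by omega))]
      rfl

theorem pvHexZ2B_eq (n : Int) : pvHexZ2B n = pvHexZ2 n := by
  simp [pvHexZ2B, pvHexZ2, pvHexSlice2B, pvHexSlice2, pvHexRevB_eq]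

-- Nat mirrors of the two numeric cores (the ports' Int values are their casts)
def nXt (a : Nat) : Nat :=
  let a1 := a <<< 1
  if a1 &&& 0x100 == 0x100 then a1 ^^^ 0x11B else a1

def nLoopA (fuel a result b : Nat) : Nat :=
  match fuel with
  | 0 => result
  | fuel + 1 =>
    if b > 0 then
      nLoopA fuel (nXt a) (if b &&& 1 == 1 then result ^^^ a else result) (b >>> 1)
    else result

def nClmul (fuel x prod shift y : Nat) : Nat :=
  match fuel with
  | 0 => prod
  | fuel + 1 =>
    if y > 0 then
      nClmul fuel x (if y &&& 1 == 1 then prod ^^^ (x <<< shift) else prod) (shift + 1) (y >>> 1)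
    else prod

def nStep (q k : Nat) : Nat := if (q >>> k) &&& 1 == 1 then q ^^^ (0x11B <<< (k - 8)) else q

def nRedc (p : Nat) : Nat := [15, 14, 13, 12, 11, 10, 9, 8].foldl nStep p

-- ---- cast bridges: each Int-level port core is the cast of its Nat mirror ----
theorem cast_shiftl (m k : Nat) : ((m : Int) <<< k) = ((m <<< k : Nat) : Int) := rfl
theorem cast_shiftr (m k : Nat) : ((m : Int) >>> k) = ((m >>> k : Nat) : Int) := rfl

theorem band_cast_one (b : Nat) : PySem.Int.band (b : Int) 1 = ((b &&& 1 : Nat) : Int) := by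
  have := PySem.Int.band_natCast b 1
  simpa using this

theorem band_cast_256 (b : Nat) : PySem.Int.band (b : Int) 0x100 = ((b &&& 0x100 : Nat) : Int) := by
  have := PySem.Int.band_natCast b 0x100
  simpa using this

theorem bxor_cast (a b : Nat) : PySem.Int.bxor (a : Int) (b : Int) = ((a ^^^ b : Nat) : Int) := by
  simpa using PySem.Int.bxor_natCast a b

theorem bxor_cast_11B (a : Nat) : PySem.Int.bxor (a : Int) 0x11B = ((a ^^^ 0x11B : Nat) : Int) := by
  have := PySem.Int.bxor_natCast a 0x11B
  simpa using this

theorem beq_cast_one (m : Nat) : (((m : Nat) : Int) == 1) = (m == 1) := by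
  cases h : (m == 1) <;> simp_all

theorem beq_cast_256 (m : Nat) : (((m : Nat) : Int) == 0x100) = (m == 0x100) := by
  by_cases h : m = 0x100
  · subst h; rfl
  · have h2 : ¬ ((m : Int) = 0x100) := by omega
    simp [h, h2]

theorem pvLoopA_cast (fuel : Nat) : ∀ (a r b : Nat),
    pvLoopA fuel (a : Int) (r : Int) (b : Int) = ((nLoopA fuel a r b : Nat) : Int) := by
  induction fuel with
  | zero => intro a r b; rfl
  | succ f ih =>
    intro a r b
    by_cases hb : 0 < b
    · have hbi : (0 : Int) < (b : Int) := by exact_mod_cast hb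
      simp only [pvLoopA, nLoopA, hb, hbi, if_pos, gt_iff_lt,
        band_cast_one, band_cast_256, bxor_cast, bxor_cast_11B,
        cast_shiftl, cast_shiftr, beq_cast_one, beq_cast_256, nXt]
      by_cases h1 : (b &&& 1 == 1) = true <;>
        by_cases h2 : ((a <<< 1) &&& 0x100 == 0x100) = true <;>
          simp only [h1, h2, if_true, if_false, Bool.false_eq_true, ite_true, ite_false] <;>
            exact ih _ _ _
    · have hbi : ¬ (0 : Int) < (b : Int) := by exact_mod_cast hb
      simp only [pvLoopA, nLoopA, gt_iff_lt, hb, hbi, if_false, ite_false]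

theorem pvClmul_cast (fuel : Nat) : ∀ (x p s y : Nat),
    pvClmul fuel (x : Int) (p : Int) s (y : Int) = ((nClmul fuel x p s y : Nat) : Int) := by
  induction fuel with
  | zero => intro x p s y; rfl
  | succ f ih =>
    intro x p s y
    by_cases hy : 0 < y
    · have hyi : (0 : Int) < (y : Int) := by exact_mod_cast hy
      simp only [pvClmul, nClmul, gt_iff_lt, hy, hyi, if_pos,
        band_cast_one, bxor_cast, cast_shiftl, cast_shiftr, beq_cast_one]
      by_cases h1 : (y &&& 1 == 1) = true <;>
        simp only [h1, if_true, if_false, Bool.false_eq_true, ite_true, ite_false] <;>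
          exact ih _ _ _ _
    · have hyi : ¬ (0 : Int) < (y : Int) := by exact_mod_cast hy
      simp only [pvClmul, nClmul, gt_iff_lt, hy, hyi, if_false, ite_false]

theorem pvStep_cast (q k : Nat) : pvStep (q : Int) (k : Int) = ((nStep q k : Nat) : Int) := by
  have h11B : ((0x11B : Int) <<< (k - 8)) = (((0x11B <<< (k - 8) : Nat)) : Int) := cast_shiftl 0x11B (k - 8)
  simp only [pvStep, nStep, Int.toNat_natCast, cast_shiftr, band_cast_one, beq_cast_one, h11B, bxor_cast]
  by_cases h : ((q >>> k) &&& 1 == 1) = true <;> simp [h]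

theorem foldl_step_cast (l : List Nat) : ∀ (p : Nat),
    (List.map (fun (n : Nat) => (n : Int)) l).foldl pvStep (p : Int) = ((l.foldl nStep p : Nat) : Int) := by
  induction l with
  | nil => intro p; rfl
  | cons k l ih =>
    intro p
    simp only [List.map_cons, List.foldl_cons]
    rw [pvStep_cast]
    exact ih _

theorem pvRedc_cast (p : Nat) : pvRedc (p : Int) = ((nRedc p : Nat) : Int) := by
  have hr : PySem.List.pyRange 15 7 (-1) =
      List.map (fun (n : Nat) => (n : Int)) [15, 14, 13, 12, 11, 10, 9, 8] := by decide
  unfold pvRedc nRedc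
  rw [hr]
  exact foldl_step_cast _ p

-- ---- fuel saturation: any fuel ≥ the bit length computes the same value ----
theorem nLoopA_fuel : ∀ (b f f' a r : Nat), b < 2 ^ f → b < 2 ^ f' →
    nLoopA f a r b = nLoopA f' a r b := by
  intro b
  induction b using Nat.strong_induction_on with
  | _ b ih =>
    intro f f' a r hf hf'
    match f, f' with
    | 0, 0 => rfl
    | 0, g + 1 =>
      have hb0 : b = 0 := by simpa using hf
      subst hb0; simp [nLoopA]
    | g + 1, 0 =>
      have hb0 : b = 0 := by simpa using hf'
      subst hb0; simp [nLoopA]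
    | g + 1, g' + 1 =>
      by_cases hb : 0 < b
      · simp only [nLoopA, hb, if_pos]
        have h2 : b >>> 1 = b / 2 := Nat.shiftRight_one b
        have hg : (2 : Nat) ^ (g + 1) = 2 * 2 ^ g := by ring
        have hg' : (2 : Nat) ^ (g' + 1) = 2 * 2 ^ g' := by ring
        exact ih (b >>> 1) (by omega) g g' _ _ (by omega) (by omega)
      · simp [nLoopA, hb]

theorem nClmul_fuel : ∀ (y f f' x p s : Nat), y < 2 ^ f → y < 2 ^ f' →
    nClmul f x p s y = nClmul f' x p s y := by
  intro y
  induction y using Nat.strong_induction_on with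
  | _ y ih =>
    intro f f' x p s hf hf'
    match f, f' with
    | 0, 0 => rfl
    | 0, g + 1 =>
      have hy0 : y = 0 := by simpa using hf
      subst hy0; simp [nClmul]
    | g + 1, 0 =>
      have hy0 : y = 0 := by simpa using hf'
      subst hy0; simp [nClmul]
    | g + 1, g' + 1 =>
      by_cases hy : 0 < y
      · simp only [nClmul, hy, if_pos]
        have h2 : y >>> 1 = y / 2 := Nat.shiftRight_one y
        have hg : (2 : Nat) ^ (g + 1) = 2 * 2 ^ g := by ring
        have hg' : (2 : Nat) ^ (g' + 1) = 2 * 2 ^ g' := by ring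
        exact ih (y >>> 1) (by omega) g g' _ _ _ (by omega) (by omega)
      · simp [nClmul, hy]

-- ---- XOR-linearity of both cores in the first factor ----
theorem nXt_closed (a : Nat) :
    nXt a = (a <<< 1) ^^^ (if (a <<< 1).testBit 8 then 0x11B else 0) := by
  have h := Nat.and_two_pow (a <<< 1) 8
  cases hb : (a <<< 1).testBit 8
  · rw [hb] at h; norm_num at h
    simp [nXt, h]
  · rw [hb] at h; norm_num at h
    simp [nXt, h]

theorem nXt_xor (a b : Nat) : nXt (a ^^^ b) = nXt a ^^^ nXt b := by
  simp only [nXt_closed, Nat.shiftLeft_xor_distrib, Nat.testBit_xor]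
  cases ha : (a <<< 1).testBit 8 <;> cases hb : (b <<< 1).testBit 8 <;>
    simp [Nat.xor_assoc, Nat.xor_comm, Nat.xor_left_comm, Nat.xor_self, Nat.xor_zero]

theorem nLoopA_acc (fuel : Nat) : ∀ (a r b : Nat), nLoopA fuel a r b = r ^^^ nLoopA fuel a 0 b := by
  induction fuel with
  | zero => intro a r b; simp [nLoopA]
  | succ f ih =>
    intro a r b
    by_cases hb : 0 < b
    · by_cases h1 : (b &&& 1 == 1) = true <;> simp only [nLoopA, hb, if_pos, h1, ite_true,
        Bool.false_eq_true, ite_false]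
      · rw [ih (nXt a) (r ^^^ a), ih (nXt a) (0 ^^^ a)]
        simp [Nat.xor_assoc]
      · exact ih _ r _
    · simp [nLoopA, hb]

theorem nLoopA_add (fuel : Nat) : ∀ (a a' b : Nat),
    nLoopA fuel (a ^^^ a') 0 b = nLoopA fuel a 0 b ^^^ nLoopA fuel a' 0 b := by
  induction fuel with
  | zero => intro a a' b; simp [nLoopA]
  | succ f ih =>
    intro a a' b
    by_cases hb : 0 < b
    · by_cases h1 : (b &&& 1 == 1) = true <;> simp only [nLoopA, hb, if_pos, h1, ite_true,
        Bool.false_eq_true, ite_false]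
      · rw [nLoopA_acc f _ (0 ^^^ (a ^^^ a')), nLoopA_acc f _ (0 ^^^ a), nLoopA_acc f _ (0 ^^^ a'),
          nXt_xor, ih]
        simp [Nat.xor_assoc, Nat.xor_comm, Nat.xor_left_comm]
      · rw [nXt_xor]; exact ih _ _ _
    · simp [nLoopA, hb]

theorem nClmul_acc (fuel : Nat) : ∀ (x p s y : Nat), nClmul fuel x p s y = p ^^^ nClmul fuel x 0 s y := by
  induction fuel with
  | zero => intro x p s y; simp [nClmul]
  | succ f ih =>
    intro x p s y
    by_cases hy : 0 < y
    · by_cases h1 : (y &&& 1 == 1) = true <;> simp only [nClmul, hy, if_pos, h1, ite_true,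
        Bool.false_eq_true, ite_false]
      · rw [ih x (p ^^^ x <<< s), ih x (0 ^^^ x <<< s)]
        simp [Nat.xor_assoc]
      · exact ih _ p _ _
    · simp [nClmul, hy]

theorem nClmul_add (fuel : Nat) : ∀ (x x' s y : Nat),
    nClmul fuel (x ^^^ x') 0 s y = nClmul fuel x 0 s y ^^^ nClmul fuel x' 0 s y := by
  induction fuel with
  | zero => intro x x' s y; simp [nClmul]
  | succ f ih =>
    intro x x' s y
    by_cases hy : 0 < y
    · by_cases h1 : (y &&& 1 == 1) = true <;> simp only [nClmul, hy, if_pos, h1, ite_true,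
        Bool.false_eq_true, ite_false]
      · rw [nClmul_acc f _ (0 ^^^ (x ^^^ x') <<< s), nClmul_acc f _ (0 ^^^ x <<< s),
          nClmul_acc f _ (0 ^^^ x' <<< s), Nat.shiftLeft_xor_distrib, ih]
        simp [Nat.xor_assoc, Nat.xor_comm, Nat.xor_left_comm]
      · exact ih _ _ _ _
    · simp [nClmul, hy]

theorem cond_testBit (r k : Nat) : ((r >>> k) &&& 1 == 1) = r.testBit k := by
  have h1 : (r >>> k) &&& 1 = (r >>> k) % 2 := Nat.and_one_is_mod _
  have h2 : 1 &&& (r >>> k) = (r >>> k) % 2 := by rw [Nat.land_comm]; exact h1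
  rw [Nat.testBit, h1, h2]
  rcases Nat.mod_two_eq_zero_or_one (r >>> k) with h | h <;> rw [h] <;> rfl

theorem nStep_add (k p q : Nat) : nStep (p ^^^ q) k = nStep p k ^^^ nStep q k := by
  simp only [nStep, cond_testBit, Nat.testBit_xor]
  cases hp : p.testBit k <;> cases hq : q.testBit k <;>
    simp [Nat.xor_assoc, Nat.xor_comm, Nat.xor_left_comm, Nat.xor_self, Nat.xor_zero]

theorem foldl_nStep_add (l : List Nat) : ∀ (p q : Nat),
    l.foldl nStep (p ^^^ q) = l.foldl nStep p ^^^ l.foldl nStep q := by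
  induction l with
  | nil => intro p q; rfl
  | cons k l ih => intro p q; simp only [List.foldl]; rw [nStep_add]; exact ih _ _

theorem nRedc_add (p q : Nat) : nRedc (p ^^^ q) = nRedc p ^^^ nRedc q := by
  exact foldl_nStep_add _ p q

-- ---- base cases, checked by decide ----
set_option maxRecDepth 100000 in
theorem base_zero : ∀ y < 256, nLoopA 8 0 0 y = nRedc (nClmul 8 0 0 0 y) := by decide

set_option maxRecDepth 1000000 in
set_option maxHeartbeats 2000000 in
theorem base_pow : ∀ k < 8, ∀ y < 256, nLoopA 8 (2 ^ k) 0 y = nRedc (nClmul 8 (2 ^ k) 0 0 y) := by decide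

-- ---- bit decomposition of x ----
theorem split_bit (x k : Nat) (hx : x < 2 ^ (k + 1)) :
    x = (x &&& 2 ^ k) ^^^ (x &&& (2 ^ k - 1)) := by
  apply Nat.eq_of_testBit_eq
  intro i
  simp only [Nat.testBit_xor, Nat.testBit_and, Nat.testBit_two_pow, Nat.testBit_two_pow_sub_one]
  rcases lt_trichotomy i k with h | h | h
  · simp [h, show k ≠ i by omega]
  · simp [h, show ¬ k < k by omega]
  · have hxi : x < 2 ^ i := lt_of_lt_of_le hx (Nat.pow_le_pow_right (by norm_num) (by omega))
    have hf : x.testBit i = false := Nat.testBit_lt_two_pow hxi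
    simp [hf]

theorem core_n : ∀ k ≤ 8, ∀ x < 2 ^ k, ∀ y < 256,
    nLoopA 8 x 0 y = nRedc (nClmul 8 x 0 0 y) := by
  intro k
  induction k with
  | zero =>
    intro _ x hx y hy
    have hx0 : x = 0 := by simpa using hx
    subst hx0
    exact base_zero y hy
  | succ k ih =>
    intro hk x hx y hy
    have hsplit := split_bit x k hx
    have hlo : (x &&& (2 ^ k - 1)) < 2 ^ k := by
      rw [Nat.and_two_pow_sub_one_eq_mod]
      exact Nat.mod_lt _ (Nat.pow_pos (by norm_num : (0:Nat) < 2))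
    have hhi := Nat.and_two_pow x k
    have hA : nLoopA 8 x 0 y
        = nLoopA 8 (x &&& 2 ^ k) 0 y ^^^ nLoopA 8 (x &&& (2 ^ k - 1)) 0 y := by
      conv_lhs => rw [hsplit]
      exact nLoopA_add 8 _ _ y
    have hB : nRedc (nClmul 8 x 0 0 y)
        = nRedc (nClmul 8 (x &&& 2 ^ k) 0 0 y) ^^^ nRedc (nClmul 8 (x &&& (2 ^ k - 1)) 0 0 y) := by
      conv_lhs => rw [hsplit]
      rw [nClmul_add 8 _ _ 0 y, nRedc_add]
    rw [hA, hB]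
    have hhi_eq : nLoopA 8 (x &&& 2 ^ k) 0 y = nRedc (nClmul 8 (x &&& 2 ^ k) 0 0 y) := by
      cases hbit : x.testBit k
      · have h0 : x &&& 2 ^ k = 0 := by rw [hhi, hbit]; simp
        rw [h0]; exact base_zero y hy
      · have h1 : x &&& 2 ^ k = 2 ^ k := by rw [hhi, hbit]; simp
        rw [h1]; exact base_pow k (by omega) y hy
    rw [hhi_eq, ih (by omega) _ hlo y hy]

-- ===== VERDICT (by name: the statement is the Claim_ definition above) =====
theorem core_nat : ∀ x < 256, ∀ y < 256, nLoopA 8 x 0 y = nRedc (nClmul 8 x 0 0 y) := by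
  intro x hx y hy
  exact core_n 8 le_rfl x (by norm_num; omega) y hy

theorem aesPolynomialMultiply_spec : Claim_equal_aesPolynomialMultiply := by
  intro a b _ hpre
  unfold Pre_aesPolynomialMultiply at hpre
  unfold Spec_aesPolynomialMultiply aesPolynomialMultiply aesPolynomialMultiply_alt
  rcases hpa : PySem.Int.ofStrBase? a 16 with _ | x
  · exact absurd hpre.1 (by rw [hpa]; decide)
  rcases hpb : PySem.Int.ofStrBase? b 16 with _ | y
  · exact absurd hpre.2.2.1 (by rw [hpb]; decide)
  rw [hpa, hpb] at hpre
  simp only [Option.getD_some] at hpre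
  obtain ⟨hx0, hx1, hy0, hy1⟩ := hpre
  simp only [hpa, hpb]
  rw [pvHexZ2B_eq]
  congr 1
  have hxe : x = ((x.toNat : Nat) : Int) := by omega
  have hye : y = ((y.toNat : Nat) : Int) := by omega
  rw [hxe, hye]
  have htn : (((y.toNat : Nat) : Int)).toNat = y.toNat := by omega
  have hA := pvLoopA_cast y.toNat x.toNat 0 y.toNat
  have hC := pvClmul_cast y.toNat x.toNat 0 0 y.toNat
  simp only [Nat.cast_zero] at hA hC
  rw [htn, hA, hC, pvRedc_cast]
  congr 1
  have hyb : y.toNat < 2 ^ y.toNat := Nat.lt_two_pow_self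
  have hy256 : y.toNat < 2 ^ 8 := by norm_num; omega
  rw [nLoopA_fuel y.toNat y.toNat 8 x.toNat 0 hyb hy256,
    nClmul_fuel y.toNat y.toNat 8 x.toNat 0 0 hyb hy256]
  exact core_nat x.toNat (by omega) y.toNat (by omega)
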